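-- pv_equiv track=rewrite | github.com/cutyapple/Programming | 알고리즘/프로그래머스/코딩테스트 연습 - Level 1/이상한 문자 만들기.py | solution
-- ===== SOURCE A (Python) =====
-- def solution(s):
--     answer = ''
--
--     strings = s.split(' ')
--
--     for idx, string in enumerate(strings):
--         temp_string = ''
--         for index, _ in enumerate(string):
--             if index % 2 == 0:
--                 temp_string += string[index].upper()
--             else:
--                 temp_string += string[index].lower()
--         if idx+1 != strings.__len__():
--             answer += temp_string+' '
--         else:
--             answer += temp_string
--
--     return answer
-- ===== SOURCE B (Python) =====
-- def solution(s):
--     out = []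
--     pos = 0
--     for c in s:
--         if c == ' ':
--             out.append(c)
--             pos = 0
--         else:
--             out.append(c.upper() if pos % 2 == 0 else c.lower())
--             pos += 1
--     return ''.join(out)
-- ===== Notes on version B (the rewrite author's own statement) =====
-- stated objective: simpler
-- what changed: single left-to-right character scan with a position counter reset at each space delimiter, instead of splitting into words and running a per-word enumerate/index loop with manual last-word separator handling
import Mathlib
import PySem

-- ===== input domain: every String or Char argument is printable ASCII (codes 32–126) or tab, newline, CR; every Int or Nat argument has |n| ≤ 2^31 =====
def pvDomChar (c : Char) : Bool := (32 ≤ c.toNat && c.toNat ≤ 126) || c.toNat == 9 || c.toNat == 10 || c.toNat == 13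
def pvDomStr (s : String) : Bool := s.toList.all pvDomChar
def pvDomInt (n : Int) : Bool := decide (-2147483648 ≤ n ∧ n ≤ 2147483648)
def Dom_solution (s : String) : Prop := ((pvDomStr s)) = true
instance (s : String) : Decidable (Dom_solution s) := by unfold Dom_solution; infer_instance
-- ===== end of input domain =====

-- B replaces A's word-splitting and per-word index loops by one character scan with a counter reset at spaces (simpler); return values proved equal.

-- ===== PORT A =====
-- inner loop of A: temp_string built by enumerate over the word, indexing back into it to pick upper/lower case
def pvAInner (w : List Char) : List Char :=
  (PySem.List.enumerate w 0).foldl (fun temp p =>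
    if PySem.Int.mod p.1 2 = 0 then temp ++ [PySem.Chars.upperChar (PySem.List.pyGetD w p.1 ' ')]
    else temp ++ [PySem.Chars.lowerChar (PySem.List.pyGetD w p.1 ' ')]) []

def solution (s : String) : String :=
  let strings := PySem.Chars.splitOn s.toList [' ']
  String.ofList ((PySem.List.enumerate strings 0).foldl (fun answer p =>
    let temp := pvAInner p.2
    if p.1 + 1 ≠ (strings.length : Int) then answer ++ temp ++ [' ']
    else answer ++ temp) [])

-- ===== PORT B =====
-- one step of B's scan: state = (output so far, position in current word)
def pvBStep (st : List Char × Nat) (c : Char) : List Char × Nat :=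
  if c = ' ' then (st.1 ++ [c], 0)
  else (st.1 ++ [if st.2 % 2 = 0 then PySem.Chars.upperChar c else PySem.Chars.lowerChar c], st.2 + 1)

def solution_alt (s : String) : String :=
  String.ofList ((s.toList.foldl pvBStep ([], 0)).1)

-- ===== PRECONDITION & SPEC =====
def Spec_solution (s : String) (out : String) : Prop := out = solution_alt s
instance (s : String) (out : String) : Decidable (Spec_solution s out) := by unfold Spec_solution; infer_instance

-- ===== CLAIM (what is proved, stated in full; the proofs are below) =====
def Claim_equal_solution : Prop := ∀ (s : String), Dom_solution s → Spec_solution s (solution s)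

-- ===== LEMMAS AND PROOFS =====

def pvCase (p : Nat) (c : Char) : Char :=
  if p % 2 = 0 then PySem.Chars.upperChar c else PySem.Chars.lowerChar c

def pvAlt : Nat → List Char → List Char
  | _, [] => []
  | p, c :: cs => pvCase p c :: pvAlt (p + 1) cs

def pvScan : List Char → Nat → List Char
  | [], _ => []
  | c :: cs, p => if c = ' ' then ' ' :: pvScan cs 0 else pvCase p c :: pvScan cs (p + 1)

def pvSplit : List Char → List (List Char)
  | [] => [[]]
  | c :: cs => if c = ' ' then [] :: pvSplit cs else (pvSplit cs).modifyHead (c :: ·)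

def pvG (p : Nat) (l : List (List Char)) : List Char :=
  pvAlt p l.headI ++ l.tail.flatMap (fun w => ' ' :: pvAlt 0 w)

def pvJoin : List (List Char) → List Char
  | [] => []
  | w :: ws => if ws = [] then pvAlt 0 w else pvAlt 0 w ++ ' ' :: pvJoin ws

lemma pvSplit_ne_nil (cs : List Char) : pvSplit cs ≠ [] := by
  induction cs with
  | nil => simp [pvSplit]
  | cons c cs ih =>
    simp only [pvSplit]
    split_ifs
    · simp
    · cases h : pvSplit cs with
      | nil => exact absurd h ih
      | cons w ws => simp [List.modifyHead]

lemma pv_go_eq (fuel : Nat) : ∀ (l cur : List Char) (acc : List (List Char)),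
    l.length < fuel →
    PySem.Chars.splitOn.go [' '] fuel l cur acc
      = acc.reverse ++ (pvSplit l).modifyHead (cur.reverse ++ ·) := by
  induction fuel with
  | zero => intro l cur acc h; omega
  | succ fuel ih =>
    intro l cur acc h
    cases l with
    | nil => simp [PySem.Chars.splitOn.go, pvSplit, List.modifyHead]
    | cons c rest =>
      by_cases hc : c = ' '
      · subst hc
        rw [show PySem.Chars.splitOn.go [' '] (fuel+1) (' '::rest) cur acc
              = PySem.Chars.splitOn.go [' '] fuel rest [] (cur.reverse :: acc) by
            simp [PySem.Chars.splitOn.go, List.isPrefixOf]]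
        rw [ih rest [] (cur.reverse :: acc) (by simpa using h)]
        cases hs : pvSplit rest with
        | nil => exact absurd hs (pvSplit_ne_nil rest)
        | cons w ws => simp [pvSplit, hs, List.modifyHead]
      · rw [show PySem.Chars.splitOn.go [' '] (fuel+1) (c::rest) cur acc
              = PySem.Chars.splitOn.go [' '] fuel rest (c :: cur) acc by
            simp [PySem.Chars.splitOn.go, List.isPrefixOf, Ne.symm hc]]
        rw [ih rest (c :: cur) acc (by simpa using h)]
        cases hs : pvSplit rest with
        | nil => exact absurd hs (pvSplit_ne_nil rest)
        | cons w ws => simp [pvSplit, hs, hc, List.modifyHead]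

lemma pv_splitOn_eq (l : List Char) : PySem.Chars.splitOn l [' '] = pvSplit l := by
  show PySem.Chars.splitOn.go [' '] (l.length + 1) l [] [] = pvSplit l
  rw [pv_go_eq (l.length + 1) l [] [] (by omega)]
  cases hs : pvSplit l with
  | nil => exact absurd hs (pvSplit_ne_nil l)
  | cons w ws => simp [List.modifyHead]

lemma pv_map_enum (w : List Char) : ∀ (s : Nat),
    (PySem.List.enumerate w (s : Int)).map
      (fun p => if PySem.Int.mod p.1 2 = 0 then PySem.Chars.upperChar p.2
                else PySem.Chars.lowerChar p.2) = pvAlt s w := by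
  induction w with
  | nil => intro s; simp [PySem.List.enumerate, pvAlt]
  | cons c cs ih =>
    intro s
    rw [PySem.List.enumerate_cons]
    have h2 : ((s : Int) + 1) = ((s + 1 : Nat) : Int) := by push_cast; ring
    simp only [List.map_cons, h2, ih (s + 1), pvAlt, pvCase]
    have hm : PySem.Int.mod (s : Int) 2 = ((s % 2 : Nat) : Int) := by
      exact_mod_cast PySem.Int.mod_natCast s 2
    rw [hm]
    by_cases hp : s % 2 = 0
    · simp [hp]
    · have hp2 : ¬ (2 ∣ (s : Int)) := by omega
      simp [hp, hp2]

lemma pv_inner_eq (w : List Char) : pvAInner w = pvAlt 0 w := by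
  unfold pvAInner
  have hfun : (fun (temp : List Char) (p : Int × Char) =>
      if PySem.Int.mod p.1 2 = 0 then temp ++ [PySem.Chars.upperChar (PySem.List.pyGetD w p.1 ' ')]
      else temp ++ [PySem.Chars.lowerChar (PySem.List.pyGetD w p.1 ' ')])
      = fun temp p => temp ++ [if PySem.Int.mod p.1 2 = 0
          then PySem.Chars.upperChar (PySem.List.pyGetD w p.1 ' ')
          else PySem.Chars.lowerChar (PySem.List.pyGetD w p.1 ' ')] := by
    funext temp p; split_ifs <;> rfl
  rw [hfun, PySem.List.foldl_append_singleton_eq_map, List.nil_append]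
  rw [List.map_congr_left (l := PySem.List.enumerate w 0)
    (g := fun p => if PySem.Int.mod p.1 2 = 0 then PySem.Chars.upperChar p.2
                   else PySem.Chars.lowerChar p.2)]
  · exact_mod_cast pv_map_enum w 0
  · intro p hp
    rcases (PySem.List.mem_enumerate_iff w 0 p).1 hp with ⟨k, hk, rfl⟩
    have hg : PySem.List.pyGetD w ((0 : Int) + k) ' ' = w[k] := by
      rw [PySem.List.pyGetD_eq_getElem w ' ' (by omega) (by simpa using hk)]
      congr 1; omega
    rw [hg]

lemma pv_outer_eq (ws : List (List Char)) : ∀ (a : List Char) (s L : Nat),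
    s + ws.length = L →
    (PySem.List.enumerate ws (s : Int)).foldl (fun answer p =>
      let temp := pvAInner p.2
      if p.1 + 1 ≠ (L : Int) then answer ++ temp ++ [' ']
      else answer ++ temp) a = a ++ pvJoin ws := by
  induction ws with
  | nil => intro a s L _; simp [PySem.List.enumerate, pvJoin]
  | cons w ws ih =>
    intro a s L hL
    rw [PySem.List.enumerate_cons, List.foldl_cons]
    have h2 : ((s : Int) + 1) = ((s + 1 : Nat) : Int) := by push_cast; ring
    simp only [List.length_cons] at hL
    cases ws with
    | nil =>
      have hL' : s + 1 = L := by simpa using hL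
      have hc : ¬ ((s : Int) + 1 ≠ (L : Int)) := by omega
      simp only [if_neg hc]
      rw [h2, ih _ (s+1) L (by omega)]
      simp [pvJoin, pv_inner_eq]
    | cons w' ws' =>
      simp only [List.length_cons] at hL
      have hc : (s : Int) + 1 ≠ (L : Int) := by
        intro hEq
        have : s + 1 = L := by exact_mod_cast hEq
        omega
      simp only [if_pos hc]
      rw [h2, ih _ (s+1) L (by simp at hL ⊢; omega)]
      simp [pvJoin, pv_inner_eq]

lemma pv_outer_zero (ws : List (List Char)) :
    (PySem.List.enumerate ws 0).foldl (fun answer p =>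
      let temp := pvAInner p.2
      if p.1 + 1 ≠ (ws.length : Int) then answer ++ temp ++ [' ']
      else answer ++ temp) [] = pvJoin ws := by
  have := pv_outer_eq ws [] 0 ws.length (by omega)
  simpa using this

lemma pv_join_eq_g (w : List Char) : ∀ (ws : List (List Char)),
    pvJoin (w :: ws) = pvG 0 (w :: ws) := by
  intro ws
  induction ws generalizing w with
  | nil => simp [pvJoin, pvG]
  | cons w' ws' ih =>
    simp only [pvJoin, pvG, List.headI, List.tail_cons, List.flatMap_cons] at *
    simp [ih w']

lemma pv_scan_eq_g (cs : List Char) : ∀ (p : Nat), pvG p (pvSplit cs) = pvScan cs p := by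
  induction cs with
  | nil => intro p; simp [pvSplit, pvScan, pvG, pvAlt]
  | cons c cs ih =>
    intro p
    by_cases hc : c = ' '
    · subst hc
      rw [show pvSplit (' '::cs) = [] :: pvSplit cs from by simp [pvSplit]]
      rw [show pvScan (' '::cs) p = ' ' :: pvScan cs 0 from by simp [pvScan]]
      cases hs : pvSplit cs with
      | nil => exact absurd hs (pvSplit_ne_nil cs)
      | cons w ws =>
        have h0 := ih 0
        rw [hs] at h0
        simp only [pvG, List.headI, List.tail_cons, pvAlt, List.nil_append] at h0 ⊢
        rw [← h0]
        simp
    · rw [show pvSplit (c::cs) = (pvSplit cs).modifyHead (c :: ·) from by simp [pvSplit, hc]]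
      rw [show pvScan (c::cs) p = pvCase p c :: pvScan cs (p+1) from by simp [pvScan, hc]]
      cases hs : pvSplit cs with
      | nil => exact absurd hs (pvSplit_ne_nil cs)
      | cons w ws =>
        have h1 := ih (p + 1)
        rw [hs] at h1
        simp only [List.modifyHead, pvG, List.headI, List.tail_cons, pvAlt,
          List.cons_append] at h1 ⊢
        rw [h1]

lemma pv_b_eq (cs : List Char) : ∀ (a : List Char) (p : Nat),
    (cs.foldl pvBStep (a, p)).1 = a ++ pvScan cs p := by
  induction cs with
  | nil => intro a p; simp [pvScan]
  | cons c cs ih =>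
    intro a p
    by_cases hc : c = ' '
    · subst hc
      simp only [List.foldl_cons, pvBStep, pvScan, ih]
      simp
    · simp only [List.foldl_cons, pvBStep, if_neg hc, pvScan, ih]
      simp [pvCase]

-- ===== VERDICT (by name: the statement is the Claim_ definition above) =====
theorem solution_spec : Claim_equal_solution := by
  intro s _
  simp only [Spec_solution, solution, solution_alt, pv_splitOn_eq]
  rw [pv_outer_zero, pv_b_eq s.toList [] 0, List.nil_append]
  cases hs : pvSplit s.toList with
  | nil => exact absurd hs (pvSplit_ne_nil s.toList)
  | cons w ws =>
    rw [pv_join_eq_g w ws, ← hs, pv_scan_eq_g s.toList 0]
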